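-- pv_equiv track=rewrite | github.com/i960107/algorithm | programmers/코딩테스트합격자되기/시뮬레이션/롤케이크자르기.py | solution
-- ===== SOURCE A (Python) =====
-- from typing import List
-- from collections import Counter, defaultdict
--
-- def solution(topping: List[int]) -> int:
--     right = Counter(topping)
--
--     # 전체가 같은 종류일때도 있음 주의!
--     # if (len(right) % 2 != 0):
--     #     return 0
--
--     answer = 0
--     left = defaultdict(int)
--     for i in range(len(topping)):
--         curr = topping[i]
--         left[curr] += 1
--         right[curr] -= 1
--         if right[curr] == 0:
--             right.pop(curr)
--         if len(left) == len(right):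
--             answer += 1
--         # 더 나아가면 right는 줄어들 수 밖에 없으므로 한번 추월하면 더 이상 같은 종류 가질 수 없게 됨.
--         if len(left) > len(right):
--             break
--     return answer
-- ===== SOURCE B (Python) =====
-- from typing import List
--
--
-- def solution(topping: List[int]) -> int:
--     n = len(topping)
--     # backward pass: suffix[i] = number of distinct toppings in topping[i:]
--     suffix = [0] * (n + 1)
--     seen = set()
--     for i in range(n - 1, -1, -1):
--         seen.add(topping[i])
--         suffix[i] = len(seen)
--     # forward pass: grow the left set, compare with the precomputed right count
--     left = set()
--     ans = 0
--     for i in range(n):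
--         left.add(topping[i])
--         if len(left) == suffix[i + 1]:
--             ans += 1
--     return ans
-- ===== Notes on version B (the rewrite author's own statement) =====
-- stated objective: alternative
-- what changed: Replaces A's single forward sweep that mutates a remaining-count Counter (decrement, pop-at-zero, early break) by a two-pass scheme: a backward pass precomputing suffix distinct counts into an array, then a forward pass growing only a left set and comparing its size against the precomputed count (no break needed).
import Mathlib
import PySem

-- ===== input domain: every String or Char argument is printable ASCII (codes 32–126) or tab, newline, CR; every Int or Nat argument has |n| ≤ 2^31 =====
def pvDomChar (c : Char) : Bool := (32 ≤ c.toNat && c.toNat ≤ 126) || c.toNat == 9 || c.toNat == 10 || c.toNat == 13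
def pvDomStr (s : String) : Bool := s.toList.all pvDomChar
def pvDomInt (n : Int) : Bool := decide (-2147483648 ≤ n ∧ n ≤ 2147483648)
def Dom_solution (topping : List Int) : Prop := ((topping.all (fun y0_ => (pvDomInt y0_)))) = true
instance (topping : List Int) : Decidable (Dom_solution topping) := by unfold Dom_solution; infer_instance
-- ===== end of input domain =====

-- B replaces A's forward sweep over a mutated remaining-Counter (with early break) by a
-- backward pass precomputing suffix distinct counts plus a forward pass over a growing left set.


-- ===== PORT A =====
-- the for-loop with its two dicts, the answer counter and the break, step for step
def aLoop (left right : PySem.Dict Int Int) (answer : Int) : List Int → Int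
  | [] => answer
  | curr :: rest =>
    let left' := left.modify curr 0 (· + 1)              -- left[curr] += 1  (defaultdict(int))
    let r1 := right.modify curr 0 (· - 1)                -- right[curr] -= 1 (Counter: default 0)
    let right' := if r1.getD curr 0 == 0 then r1.erase curr else r1   -- if right[curr]==0: right.pop(curr)
    let answer' := if left'.size == right'.size then answer + 1 else answer
    if right'.size < left'.size then answer'             -- break
    else aLoop left' right' answer' rest

def solution (topping : List Int) : Int :=
  aLoop PySem.Dict.empty (PySem.Dict.counter topping) 0 topping

-- ===== PORT B =====
-- backward pass: returns (set of elements seen, list whose i-th entry is len(set(topping[i:])))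
def bSuffix : List Int → PySem.Set Int × List Int
  | [] => (PySem.Set.empty, [])
  | x :: xs =>
    let p := bSuffix xs
    let s' := PySem.Set.add p.1 x
    (s', (s'.length : Int) :: p.2)

-- forward pass: left set and answer; suf is the suffix-count list aligned with the current index
def bLoop (left : PySem.Set Int) (ans : Int) : List Int → List Int → Int
  | [], _ => ans
  | x :: xs, suf =>
    let left' := PySem.Set.add left x
    let ans' := if (left'.length : Int) == suf.tail.headD 0 then ans + 1 else ans
    bLoop left' ans' xs suf.tail

def solution_alt (topping : List Int) : Int :=
  bLoop PySem.Set.empty 0 topping (bSuffix topping).2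

-- ===== PRECONDITION & SPEC =====
def Spec_solution (topping : List Int) (out : Int) : Prop := out = solution_alt topping
instance (topping : List Int) (out : Int) : Decidable (Spec_solution topping out) := by unfold Spec_solution; infer_instance

-- ===== CLAIM (what is proved, stated in full; the proofs are below) =====
def Claim_equal_solution : Prop := ∀ (topping : List Int), Dom_solution topping → Spec_solution topping (solution topping)

-- ===== LEMMAS AND PROOFS =====

-- number of distinct elements
def nDist (xs : List Int) : Nat := xs.toFinset.card

-- reference count: number of split points, walking the remainder r with processed prefix p
def specCnt (p r : List Int) : Int :=
  match r with
  | [] => 0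
  | x :: xs => (if nDist (p ++ [x]) = nDist xs then 1 else 0) + specCnt (p ++ [x]) xs

lemma length_eq_nDist {s xs : List Int} (hnd : s.Nodup) (hmem : ∀ y, y ∈ s ↔ y ∈ xs) :
    s.length = nDist xs := by
  have : s.toFinset = xs.toFinset := by
    ext y; simp [List.mem_toFinset, hmem y]
  rw [nDist, ← this, List.toFinset_card_of_nodup hnd]

lemma nDist_append_le (p q : List Int) : nDist p ≤ nDist (p ++ q) := by
  apply Finset.card_le_card
  intro y hy
  simp only [List.toFinset_append, Finset.mem_union]
  exact Or.inl hy

lemma nDist_tail_le (x : Int) (xs : List Int) : nDist xs ≤ nDist (x :: xs) := by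
  apply Finset.card_le_card
  intro y hy
  simp only [List.toFinset_cons, Finset.mem_insert]
  exact Or.inr hy

lemma specCnt_zero {p r : List Int} (h : nDist r < nDist p) : specCnt p r = 0 := by
  induction r generalizing p with
  | nil => rfl
  | cons x xs ih =>
    have h1 : nDist p ≤ nDist (p ++ [x]) := nDist_append_le p [x]
    have h2 : nDist xs ≤ nDist (x :: xs) := nDist_tail_le x xs
    have hlt : nDist xs < nDist (p ++ [x]) := by omega
    rw [specCnt, ih hlt, if_neg (by omega)]
    simp

-- dict-erase lemmas (none are provided by PySem for erase)
lemma find?_filter_ne (l : List (Int × Int)) (k k' : Int) :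
    List.find? (fun p => p.1 == k') (l.filter (fun p => !(p.1 == k))) =
      if k' = k then none else List.find? (fun p => p.1 == k') l := by
  induction l with
  | nil => simp
  | cons q rest ih =>
    by_cases hkk : k' = k
    · subst hkk
      rw [if_pos rfl, List.find?_eq_none]
      intro a ha
      have := (List.mem_filter.mp ha).2
      simpa using this
    · rw [if_neg hkk] at ih ⊢
      by_cases hq1 : q.1 = k
      · have h1 : (q.1 == k) = true := by simp [hq1]
        have h2 : (q.1 == k') = false := by simp; omega
        simp [h1, h2, ih]
      · have h1 : (q.1 == k) = false := by simp [hq1]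
        by_cases hq2 : q.1 = k'
        · have h2 : (q.1 == k') = true := by simp [hq2]
          simp [h1, h2]
        · have h2 : (q.1 == k') = false := by simp [hq2]
          simp [h1, h2, ih]

lemma get?_erase {d : PySem.Dict Int Int} {k k' : Int} :
    (d.erase k).get? k' = if k' = k then none else d.get? k' := by
  obtain ⟨items⟩ := d
  simp only [PySem.Dict.erase, PySem.Dict.get?, find?_filter_ne]
  split <;> rfl

lemma getD_erase {d : PySem.Dict Int Int} {k k' : Int} {d0 : Int} :
    (d.erase k).getD k' d0 = if k' = k then d0 else d.getD k' d0 := by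
  rw [PySem.Dict.getD, PySem.Dict.getD, get?_erase]
  split <;> rfl

lemma keys_erase {d : PySem.Dict Int Int} {k : Int} :
    (d.erase k).keys = d.keys.filter (fun y => !(y == k)) := by
  obtain ⟨items⟩ := d
  simp [PySem.Dict.erase, PySem.Dict.keys, List.filter_map, Function.comp_def]

-- size = number of keys
lemma size_eq_keys_length (d : PySem.Dict Int Int) : d.size = d.keys.length := by
  simp [PySem.Dict.size, PySem.Dict.keys]

-- a dict holding exactly the positive multiplicities of r has keys = elements of r
lemma keys_char (d : PySem.Dict Int Int) (r : List Int)
    (hc : ∀ k, d.getD k 0 = (r.count k : Int)) (hnz : ∀ k ∈ d.keys, d.getD k 0 ≠ 0) :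
    ∀ k, k ∈ d.keys ↔ k ∈ r := by
  intro k
  constructor
  · intro hk
    have h := hnz k hk
    rw [hc k] at h
    have : r.count k ≠ 0 := by exact_mod_cast h
    exact List.count_pos_iff.mp (Nat.pos_of_ne_zero this)
  · intro hk
    by_contra hnk
    have hdc : d.contains k = false := by
      rcases Bool.eq_false_or_eq_true (d.contains k) with h | h
      · exact absurd ((PySem.Dict.contains_iff_mem_keys d k).mp h) hnk
      · exact h
    have h0 := PySem.Dict.getD_of_not_contains d (0 : Int) hdc
    rw [hc k] at h0
    have : r.count k = 0 := by exact_mod_cast h0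
    exact (List.count_eq_zero.mp this) hk

-- main invariant lemma for A's loop
lemma aLoop_spec (r : List Int) (p : List Int) (left right : PySem.Dict Int Int) (ans : Int)
    (hlnd : left.keys.Nodup) (hlm : ∀ y, y ∈ left.keys ↔ y ∈ p)
    (hrnd : right.keys.Nodup) (hrc : ∀ k, right.getD k 0 = (r.count k : Int))
    (hrnz : ∀ k ∈ right.keys, right.getD k 0 ≠ 0) :
    aLoop left right ans r = ans + specCnt p r := by
  induction r generalizing p left right ans with
  | nil => simp [aLoop, specCnt]
  | cons curr rest ih =>
    simp only [aLoop]
    set L := left.modify curr 0 (· + 1) with hLdef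
    set R1 := right.modify curr 0 (· - 1) with hR1def
    set R2 := if (R1.getD curr 0 == 0) = true then R1.erase curr else R1 with hR2def
    -- left side facts
    have hlnd' : L.keys.Nodup := by
      rw [hLdef, PySem.Dict.keys_modify]
      exact PySem.Dict.nodup_keys_insert _ _ _ hlnd
    have hlm' : ∀ y, y ∈ L.keys ↔ y ∈ p ++ [curr] := by
      intro y
      rw [hLdef, PySem.Dict.keys_modify, PySem.Dict.mem_keys_insert, hlm y]
      simp [or_comm]
    have hsizeL : L.size = nDist (p ++ [curr]) := by
      rw [size_eq_keys_length]; exact length_eq_nDist hlnd' hlm'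
    -- right side facts
    have hr1c : ∀ k, R1.getD k 0 = (rest.count k : Int) := by
      intro k
      rw [hR1def, PySem.Dict.getD_modify]
      have hcnt := hrc k
      rw [List.count_cons] at hcnt
      split_ifs with h
      · subst h
        rw [hcnt]
        simp
      · rw [hcnt]
        have : (curr == k) = false := by simp; omega
        simp [this]
    have hmemR1 : ∀ k, k ∈ R1.keys ↔ k = curr ∨ k ∈ right.keys := by
      intro k
      rw [hR1def, PySem.Dict.keys_modify, PySem.Dict.mem_keys_insert]
    have hr1nd : R1.keys.Nodup := by
      rw [hR1def, PySem.Dict.keys_modify]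
      exact PySem.Dict.nodup_keys_insert _ _ _ hrnd
    have hknz : ∀ k, k ≠ curr → k ∈ R1.keys → (rest.count k : Int) ≠ 0 := by
      intro k hkc hk
      have hkr : k ∈ right.keys := ((hmemR1 k).mp hk).resolve_left hkc
      have h := hrnz k hkr
      rw [hrc k, List.count_cons] at h
      have : (curr == k) = false := by simp; omega
      rw [this] at h
      simpa using h
    have hR2c : ∀ k, R2.getD k 0 = (rest.count k : Int) := by
      intro k
      rw [hR2def]
      split_ifs with h
      · rw [getD_erase]
        split_ifs with hk
        · rw [hr1c curr] at h
          have h0 : rest.count curr = 0 := by exact_mod_cast beq_iff_eq.mp h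
          rw [hk, h0]
          simp
        · exact hr1c k
      · exact hr1c k
    have hR2nd : R2.keys.Nodup := by
      rw [hR2def]
      split_ifs with h
      · rw [keys_erase]; exact hr1nd.filter _
      · exact hr1nd
    have hR2nz : ∀ k ∈ R2.keys, R2.getD k 0 ≠ 0 := by
      intro k hk
      rw [hR2c k]
      rw [hR2def] at hk
      split_ifs at hk with h
      · rw [keys_erase, List.mem_filter] at hk
        have hkc : k ≠ curr := by simpa using hk.2
        exact hknz k hkc hk.1
      · rcases (hmemR1 k).mp hk with hkc | hkr
        · subst hkc
          rw [hr1c k] at h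
          simpa using h
        · by_cases hkc : k = curr
          · subst hkc
            rw [hr1c k] at h
            simpa using h
          · exact hknz k hkc hk
    have hsizeR : R2.size = nDist rest := by
      rw [size_eq_keys_length]
      exact length_eq_nDist hR2nd (keys_char R2 rest hR2c hR2nz)
    -- the two tests, rewritten through the size facts
    simp only [hsizeL, hsizeR]
    by_cases heq : nDist (p ++ [curr]) = nDist rest
    · rw [if_pos (by simp [heq] : (nDist (p ++ [curr]) == nDist rest) = true),
        if_neg (by omega : ¬ nDist rest < nDist (p ++ [curr])),
        ih (p ++ [curr]) L R2 (ans + 1) hlnd' hlm' hR2nd hR2c hR2nz,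
        specCnt, if_pos heq]
      ring
    · rw [if_neg (by simp [heq] : ¬ (nDist (p ++ [curr]) == nDist rest) = true)]
      by_cases hbr : nDist rest < nDist (p ++ [curr])
      · rw [if_pos hbr, specCnt, if_neg heq, specCnt_zero hbr]
        ring
      · rw [if_neg hbr,
          ih (p ++ [curr]) L R2 ans hlnd' hlm' hR2nd hR2c hR2nz,
          specCnt, if_neg heq]
        ring

-- suffix-pass characterisation
lemma bSuffix_fst (xs : List Int) :
    (bSuffix xs).1.Nodup ∧ ∀ y, y ∈ (bSuffix xs).1 ↔ y ∈ xs := by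
  induction xs with
  | nil => simp [bSuffix, PySem.Set.empty]
  | cons x xs ih =>
    refine ⟨PySem.Set.nodup_add _ _ ih.1, fun y => ?_⟩
    rw [bSuffix]
    simp only [PySem.Set.mem_add, ih.2 y, List.mem_cons]
    tauto

lemma bSuffix_headD (xs : List Int) : (bSuffix xs).2.headD 0 = (nDist xs : Int) := by
  cases xs with
  | nil => simp [bSuffix, nDist]
  | cons x xs =>
    have h := bSuffix_fst (x :: xs)
    have hlen := length_eq_nDist h.1 h.2
    simp only [bSuffix] at hlen ⊢
    simp only [List.headD_cons]
    exact_mod_cast hlen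

-- main invariant lemma for B's loop
lemma bLoop_spec (r : List Int) (p : List Int) (left : PySem.Set Int) (ans : Int)
    (hnd : left.Nodup) (hm : ∀ y, y ∈ left ↔ y ∈ p) :
    bLoop left ans r (bSuffix r).2 = ans + specCnt p r := by
  induction r generalizing p left ans with
  | nil => simp [bLoop, specCnt]
  | cons x xs ih =>
    have hnd' := PySem.Set.nodup_add left x hnd
    have hm' : ∀ y, y ∈ PySem.Set.add left x ↔ y ∈ p ++ [x] := by
      intro y; rw [PySem.Set.mem_add _ x y, hm y]; simp
    have hlen : ((PySem.Set.add left x).length : Int) = (nDist (p ++ [x]) : Int) := by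
      exact_mod_cast length_eq_nDist hnd' hm'
    have htail : (bSuffix (x :: xs)).2.tail = (bSuffix xs).2 := rfl
    rw [bLoop, htail, bSuffix_headD xs, ih (p ++ [x]) _ _ hnd' hm', specCnt]
    by_cases h : nDist (p ++ [x]) = nDist xs
    · simp only [hlen, h, beq_self_eq_true, if_pos]
      ring
    · have hb : ¬ (((PySem.Set.add left x).length : Int) == (nDist xs : Int)) = true := by
        rw [hlen]
        simpa using fun hh => h (by exact_mod_cast hh)
      rw [if_neg hb, if_neg h]
      ring

-- ===== VERDICT (by name: the statement is the Claim_ definition above) =====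
theorem solution_spec : Claim_equal_solution := by
  intro topping _
  show solution topping = solution_alt topping
  rw [solution, solution_alt]
  rw [bLoop_spec topping [] _ _ (by simp [PySem.Set.empty]) (by simp [PySem.Set.empty])]
  rw [aLoop_spec topping [] _ _ _ (by simp) (by simp)
    (PySem.Dict.nodup_keys_counter topping)
    (fun k => by simp [PySem.Dict.getD_counter])
    (fun k hk => by
      rw [PySem.Dict.keys_counter] at hk
      rw [PySem.Dict.getD_counter]
      have : k ∈ topping := (PySem.Set.mem_ofList topping k).mp hk
      have := List.count_pos_iff.mpr this
      omega)]
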